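-- pv_equiv track=rewrite | github.com/phil-chp/epitech_projects | tech1/109titration/handle_calc.py | arr_first_derivative
-- ===== SOURCE A (Python) =====
-- def arr_first_derivative(derive):
--     arr = []
--     maxi = derive[0][1]
--
--     for i in range(len(derive)):
--         if derive[i][1] > maxi:
--             maxi = derive[i][1]
--             arr = []
--             arr.append([derive[i - 1][0], derive[i - 1][1]])
--             arr.append([derive[i][0], derive[i][1]])
--             arr.append([derive[i + 1][0], derive[i + 1][1]])
--     return arr
-- ===== SOURCE B (Python) =====
-- def arr_first_derivative(derive):
--     maxi = derive[0][1]
--     for row in derive: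
--         if row[1] > maxi:
--             maxi = row[1]
--     i = [row[1] for row in derive].index(maxi)
--     if i == 0:
--         return []
--     return [[derive[i - 1][0], derive[i - 1][1]],
--             [derive[i][0], derive[i][1]],
--             [derive[i + 1][0], derive[i + 1][1]]]
-- ===== Notes on version B (the rewrite author's own statement) =====
-- stated objective: alternative
-- what changed: A rebuilds the 3-row answer inside the scan at every running-max improvement; B first computes the column maximum in one pass, then locates its first index with list.index and builds the triple once (or returns [] if the max is at index 0).
import Mathlib
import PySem

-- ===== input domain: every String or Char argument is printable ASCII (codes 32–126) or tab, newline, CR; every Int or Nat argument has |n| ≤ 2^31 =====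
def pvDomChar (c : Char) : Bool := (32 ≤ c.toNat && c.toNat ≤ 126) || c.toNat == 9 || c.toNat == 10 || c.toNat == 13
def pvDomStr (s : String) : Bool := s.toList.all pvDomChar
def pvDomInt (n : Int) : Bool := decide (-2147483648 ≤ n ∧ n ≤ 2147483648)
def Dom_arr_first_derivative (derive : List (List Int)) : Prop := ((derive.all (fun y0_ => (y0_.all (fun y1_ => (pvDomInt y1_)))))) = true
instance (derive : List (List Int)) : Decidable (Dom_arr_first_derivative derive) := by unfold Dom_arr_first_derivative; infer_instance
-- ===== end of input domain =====

-- B computes the column maximum in one pass, then locates its first index and builds the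
-- 3-row answer once; A rebuilds it inside the scan at every running-max improvement.
-- ===== PORT A =====
-- shared tiny indexing helpers (Python derive[i], row[0], row[1]; getD 0/[] only outside Pre_)
def pvRow (derive : List (List Int)) (i : Int) : List Int :=
  (PySem.List.pyGet? derive i).getD []
def pvFst (row : List Int) : Int := (PySem.List.pyGet? row 0).getD 0
def pvSnd (row : List Int) : Int := (PySem.List.pyGet? row 1).getD 0
-- [[derive[i-1][0], derive[i-1][1]], [derive[i][0], …], [derive[i+1][0], …]]
def pvTriple (derive : List (List Int)) (i : Int) : List (List Int) :=
  [[pvFst (pvRow derive (i - 1)), pvSnd (pvRow derive (i - 1))],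
   [pvFst (pvRow derive i), pvSnd (pvRow derive i)],
   [pvFst (pvRow derive (i + 1)), pvSnd (pvRow derive (i + 1))]]

def arr_first_derivative (derive : List (List Int)) : List (List Int) :=
  ((List.range derive.length).foldl
    (fun (st : List (List Int) × Int) (i : Nat) =>
      if pvSnd (pvRow derive (i : Int)) > st.2
      then (pvTriple derive (i : Int), pvSnd (pvRow derive (i : Int)))
      else st)
    (([] : List (List Int)), pvSnd (pvRow derive 0))).1

-- ===== PORT B =====
def arr_first_derivative_alt (derive : List (List Int)) : List (List Int) :=
  let maxi := derive.foldl (fun m row => if pvSnd row > m then pvSnd row else m)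
                (pvSnd (pvRow derive 0))
  let i : Nat := (PySem.List.index? (derive.map pvSnd) maxi).getD 0
  if i = 0 then [] else pvTriple derive (i : Int)

-- ===== PRECONDITION & SPEC =====
-- Pre_ excludes exactly the inputs on which the Python A raises IndexError (and B raises too):
-- empty input, a row of length < 2, or the column maximum first attained at the last index.
def Pre_arr_first_derivative (derive : List (List Int)) : Prop :=
  derive ≠ [] ∧ (∀ r ∈ derive, 2 ≤ r.length) ∧
  ¬(2 ≤ derive.length ∧ ∀ k < derive.length - 1,
      (derive.getD k []).getD 1 0 < (derive.getD (derive.length - 1) []).getD 1 0)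
instance (derive : List (List Int)) : Decidable (Pre_arr_first_derivative derive) := by
  unfold Pre_arr_first_derivative; infer_instance

def pvWitness_arr_first_derivative : List (List Int) := [[0, 5], [1, 9], [2, 4]]

def Spec_arr_first_derivative (derive : List (List Int)) (out : List (List Int)) : Prop := out = arr_first_derivative_alt derive
instance (derive : List (List Int)) (out : List (List Int)) : Decidable (Spec_arr_first_derivative derive out) := by unfold Spec_arr_first_derivative; infer_instance

-- ===== CLAIM (what is proved, stated in full; the proofs are below) =====
def Claim_equal_arr_first_derivative : Prop := ∀ (derive : List (List Int)), Dom_arr_first_derivative derive → Pre_arr_first_derivative derive → Spec_arr_first_derivative derive (arr_first_derivative derive)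

-- ===== LEMMAS AND PROOFS =====

-- running maximum of v 0, …, v (n-1) seeded with v 0, and the index of its last strict improvement
def pvM (v : Nat → Int) : Nat → Int
  | 0 => v 0
  | n + 1 => if v n > pvM v n then v n else pvM v n
def pvJ (v : Nat → Int) : Nat → Nat
  | 0 => 0
  | n + 1 => if v n > pvM v n then n else pvJ v n

lemma pvM_ge (v : Nat → Int) : ∀ n k, k < n → v k ≤ pvM v n := by
  intro n
  induction n with
  | zero => omega
  | succ n ih =>
    intro k hk
    by_cases h : v n > pvM v n <;> simp only [pvM, h, if_true, if_false] <;>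
      rcases Nat.lt_succ_iff_lt_or_eq.1 hk with h' | h'
    · exact le_of_lt (lt_of_le_of_lt (ih k h') h)
    · subst h'; exact le_refl _
    · exact ih k h'
    · subst h'; omega

lemma pvM_eq_val (v : Nat → Int) : ∀ n, pvM v n = v (pvJ v n) := by
  intro n
  induction n with
  | zero => simp [pvM, pvJ]
  | succ n ih =>
    by_cases h : v n > pvM v n
    · simp only [pvM, pvJ, if_pos h]
    · simp only [pvM, pvJ, if_neg h]; exact ih

lemma pvJ_le (v : Nat → Int) : ∀ n, pvJ v (n + 1) ≤ n := by
  intro n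
  induction n with
  | zero => simp [pvJ, pvM]
  | succ n ih =>
    by_cases h : v (n + 1) > pvM v (n + 1)
    · simp [pvJ, h]
    · rw [show pvJ v (n + 2) = if v (n + 1) > pvM v (n + 1) then n + 1 else pvJ v (n + 1) from rfl,
        if_neg h]
      omega

lemma pvJ_first (v : Nat → Int) : ∀ n k, k < pvJ v n → v k < pvM v n := by
  intro n
  induction n with
  | zero => simp [pvJ]
  | succ n ih =>
    intro k hk
    by_cases h : v n > pvM v n <;> simp only [pvJ, pvM, h, if_true, if_false] at hk ⊢
    · exact lt_of_le_of_lt (pvM_ge v n k hk) h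
    · exact ih k hk

-- the step function of port A
def pvStepA (derive : List (List Int)) (st : List (List Int) × Int) (i : Nat) : List (List Int) × Int :=
  if pvSnd (pvRow derive (i : Int)) > st.2
  then (pvTriple derive (i : Int), pvSnd (pvRow derive (i : Int)))
  else st

lemma A_fold (derive : List (List Int)) (n : Nat) :
    (List.range n).foldl (pvStepA derive) (([] : List (List Int)), pvSnd (pvRow derive 0)) =
      ((if pvJ (fun k => pvSnd (pvRow derive (k : Int))) n = 0 then []
        else pvTriple derive ((pvJ (fun k => pvSnd (pvRow derive (k : Int))) n : Nat) : Int)),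
       pvM (fun k => pvSnd (pvRow derive (k : Int))) n) := by
  induction n with
  | zero => simp [pvM, pvJ]
  | succ n ih =>
    rw [List.range_succ, List.foldl_append, ih]
    simp only [List.foldl_cons, List.foldl_nil, pvStepA, pvM, pvJ]
    by_cases h : pvSnd (pvRow derive (n : Int)) > pvM (fun k => pvSnd (pvRow derive (k : Int))) n
    · have hn : n ≠ 0 := by
        intro h0; subst h0; simp [pvM] at h
      simp [h, hn]
    · simp [h]

-- a list foldl of the running max equals the index-driven running max
lemma foldl_max_eq (l : List (List Int)) : ∀ (v : Nat → Int) (a : Int),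
    (∀ k (h : k < l.length), v k = pvSnd (l[k])) →
    l.foldl (fun m row => if pvSnd row > m then pvSnd row else m) a =
      (List.range l.length).foldl (fun m j => if v j > m then v j else m) a := by
  induction l with
  | nil => intro v a _; simp
  | cons r rs ih =>
    intro v a hv
    simp only [List.foldl_cons, List.length_cons, List.range_succ_eq_map, List.foldl_map]
    have h0 := hv 0 (by simp)
    simp only [List.getElem_cons_zero] at h0
    rw [h0]
    exact ih (fun k => v (k + 1)) _ (fun k h => by simpa using hv (k + 1) (by simpa using h))

lemma range_max_eq_pvM (v : Nat → Int) : ∀ n,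
    (List.range n).foldl (fun m j => if v j > m then v j else m) (v 0) = pvM v n := by
  intro n
  induction n with
  | zero => simp [pvM]
  | succ n ih => rw [List.range_succ, List.foldl_append, ih]; simp [pvM]

lemma index?_eq_of_first {l : List Int} {x : Int} {k : Nat} (hk : k < l.length)
    (hx : l[k] = x) (hbefore : ∀ j (hj : j < k), l[j]'(by omega) ≠ x) :
    PySem.List.index? l x = some k := by
  rw [PySem.List.index?_eq_some_iff]
  refine ⟨l.take k, l.drop (k + 1), ?_, by rw [List.length_take]; omega, ?_⟩
  · conv_lhs => rw [← List.take_append_drop k l]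
    rw [List.drop_eq_getElem_cons hk, hx]
  · intro hmem
    rcases List.mem_take_iff_getElem.1 hmem with ⟨j, hj, hje⟩
    exact hbefore j (by omega) (by simpa using hje)

lemma map_getElem_pvSnd (derive : List (List Int)) (k : Nat) (hk : k < derive.length) :
    (derive.map pvSnd)[k]'(by simpa using hk) = pvSnd (pvRow derive (k : Int)) := by
  simp [pvRow, hk]

lemma B_index (derive : List (List Int)) (h : derive ≠ []) :
    PySem.List.index? (derive.map pvSnd)
        (pvM (fun k => pvSnd (pvRow derive (k : Int))) derive.length) =
      some (pvJ (fun k => pvSnd (pvRow derive (k : Int))) derive.length) := by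
  have hlen : 0 < derive.length := List.length_pos_iff.2 h
  have hJlt : pvJ (fun k => pvSnd (pvRow derive (k : Int))) derive.length < derive.length := by
    rcases Nat.exists_eq_succ_of_ne_zero (Nat.pos_iff_ne_zero.1 hlen) with ⟨m, hm⟩
    rw [hm]; exact Nat.lt_succ_of_le (pvJ_le _ m)
  apply index?_eq_of_first (by simpa using hJlt)
  · rw [map_getElem_pvSnd derive _ hJlt]
    exact (pvM_eq_val (fun k => pvSnd (pvRow derive (k : Int))) derive.length).symm
  · intro j hj
    rw [map_getElem_pvSnd derive j (by omega)]
    exact ne_of_lt (pvJ_first (fun k => pvSnd (pvRow derive (k : Int))) derive.length j hj)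

-- ===== VERDICT (by name: the statement is the Claim_ definition above) =====
theorem arr_first_derivative_spec : Claim_equal_arr_first_derivative := by
  intro derive _ hpre
  unfold Spec_arr_first_derivative arr_first_derivative arr_first_derivative_alt
  rw [show (fun (st : List (List Int) × Int) (i : Nat) =>
      if pvSnd (pvRow derive (i : Int)) > st.2
      then (pvTriple derive (i : Int), pvSnd (pvRow derive (i : Int)))
      else st) = pvStepA derive from rfl, A_fold derive derive.length]
  rw [foldl_max_eq derive (fun k => pvSnd (pvRow derive (k : Int)))
        (pvSnd (pvRow derive 0)) (fun k hk => by simp [pvRow, hk])]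
  have h0 : pvSnd (pvRow derive 0) = (fun k : Nat => pvSnd (pvRow derive (k : Int))) 0 := by simp
  rw [h0, range_max_eq_pvM]
  show _ = (if (PySem.List.index? (derive.map pvSnd)
        (pvM (fun k => pvSnd (pvRow derive (k : Int))) derive.length)).getD 0 = 0 then []
      else pvTriple derive
        (((PySem.List.index? (derive.map pvSnd)
            (pvM (fun k => pvSnd (pvRow derive (k : Int))) derive.length)).getD 0 : Nat) : Int))
  rw [B_index derive hpre.1]
  simp
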